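-- pv_equiv track=rewrite | github.com/CactusXiao/algorithm_lab_2 | lab2-1.py | get_hashes
-- ===== SOURCE A (Python) =====
-- def get_hashes(s, k):
--     """计算序列中所有 k-mer 的滚动哈希值集合。"""
--     hashes = set()
--     n = len(s)
--     if n < k:
--         return hashes
--
--     base = 256  # 哈希计算的基数
--     mod = 1000000007  # 大素数模数，减少哈希冲突
--
--     # 计算第一个 k-mer 的哈希值
--     current_hash = 0
--     for i in range(k):
--         current_hash = (current_hash * base + ord(s[i])) % mod
--     hashes.add(current_hash)
--
--     # 预计算 base^(k-1) % mod 用于滚动哈希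
--     base_k_minus_1 = pow(base, k - 1, mod)
--
--     # 使用滚动哈希计算后续 k-mer 的哈希值
--     for i in range(1, n - k + 1):
--         current_hash = (current_hash - ord(s[i - 1]) * base_k_minus_1) % mod
--         current_hash = (current_hash * base + ord(s[i + k - 1])) % mod
--         hashes.add(current_hash)
--     return hashes
-- ===== SOURCE B (Python) =====
-- def get_hashes(s, k):
--     """Set of hashes of all k-mers, each window hashed directly from scratch."""
--     hashes = set()
--     mod = 1000000007
--     for i in range(len(s) - k + 1):
--         h = 0
--         for c in s[i:i + k]:
--             h = (h * 256 + ord(c)) % mod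
--         hashes.add(h)
--     return hashes
-- ===== Notes on version B (the rewrite author's own statement) =====
-- stated objective: simpler
-- what changed: Replaced the rolling-hash recurrence (first-window fold, precomputed base^(k-1) and subtract-leading-char updates) by direct recomputation: one loop over window starts that hashes each k-character slice from scratch.
import Mathlib
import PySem

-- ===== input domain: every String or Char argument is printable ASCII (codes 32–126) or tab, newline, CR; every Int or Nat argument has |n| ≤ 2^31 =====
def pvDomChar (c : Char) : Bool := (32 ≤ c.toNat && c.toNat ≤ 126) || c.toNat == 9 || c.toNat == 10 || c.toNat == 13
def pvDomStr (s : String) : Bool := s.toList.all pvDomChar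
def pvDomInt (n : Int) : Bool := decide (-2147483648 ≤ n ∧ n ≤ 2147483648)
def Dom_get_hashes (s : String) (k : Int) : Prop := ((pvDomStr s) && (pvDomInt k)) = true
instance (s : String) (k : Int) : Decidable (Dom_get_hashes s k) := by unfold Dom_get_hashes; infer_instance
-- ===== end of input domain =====

-- B replaces A's rolling-hash recurrence by hashing each k-character window from scratch: simpler, same return value.

-- ===== PORT A =====
-- ord(s[i]) for an index the program keeps in range (the default is unreachable on admitted inputs)
def pvOrd (s : String) (i : Int) : Int :=
  (((PySem.Str.pyGet? s i).getD ' ').toNat : Int)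

-- hand port of Python's three-argument pow for a possibly negative exponent: for e < 0 Python takes the
-- modular inverse of b (exact whenever gcd(b,m) = 1, which holds on every call A makes: b = 256, m prime)
def pvPowMod (b e m : Int) : Int :=
  if 0 ≤ e then PySem.Int.powMod b e.toNat m
  else PySem.Int.powMod (PySem.Int.mod (Int.gcdA b m) m) (-e).toNat m

def get_hashes (s : String) (k : Int) : List Int :=
  let n : Int := PySem.Str.len s
  if n < k then []
  else
    let base : Int := 256
    let md : Int := 1000000007
    let current : Int := (PySem.List.pyRange 0 k 1).foldl
      (fun h i => PySem.Int.mod (h * base + pvOrd s i) md) 0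
    let hashes : List Int := PySem.Set.add [] current
    let bk : Int := pvPowMod base (k - 1) md
    let res := (PySem.List.pyRange 1 (n - k + 1) 1).foldl
      (fun st i =>
        let c1 := PySem.Int.mod (st.2 - pvOrd s (i - 1) * bk) md
        let c2 := PySem.Int.mod (c1 * base + pvOrd s (i + k - 1)) md
        (PySem.Set.add st.1 c2, c2))
      (hashes, current)
    res.1

-- ===== PORT B =====
def get_hashes_alt (s : String) (k : Int) : List Int :=
  let md : Int := 1000000007
  (PySem.List.pyRange 0 (PySem.Str.len s - k + 1) 1).foldl
    (fun hs i =>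
      let h := (PySem.List.slice s.toList (some i) (some (i + k))).foldl
        (fun h c => PySem.Int.mod (h * 256 + (c.toNat : Int)) md) 0
      PySem.Set.add hs h) []

-- ===== PRECONDITION & SPEC =====
-- Pre_ excludes exactly k < 0, where the Python A raises IndexError (its rolling loop indexes past the string).
def Pre_get_hashes (s : String) (k : Int) : Prop := 0 ≤ k
instance (s : String) (k : Int) : Decidable (Pre_get_hashes s k) := by unfold Pre_get_hashes; infer_instance
def pvWitness_get_hashes : String × Int := ("abcab", 2)

def Spec_get_hashes (s : String) (k : Int) (out : List Int) : Prop := out = get_hashes_alt s k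
instance (s : String) (k : Int) (out : List Int) : Decidable (Spec_get_hashes s k out) := by unfold Spec_get_hashes; infer_instance

-- ===== CLAIM (what is proved, stated in full; the proofs are below) =====
def Claim_equal_get_hashes : Prop := ∀ (s : String) (k : Int), Dom_get_hashes s k → Pre_get_hashes s k → Spec_get_hashes s k (get_hashes s k)

-- ===== LEMMAS AND PROOFS =====

-- the modulus and the two fold bodies (reduced and unreduced Horner step)
def pvP : Int := 1000000007
def pvF (h c : Int) : Int := (h * 256 + c) % pvP
def pvG (h c : Int) : Int := h * 256 + c
-- the string as its list of character codes
def pvOrdL (s : String) : List Int := s.toList.map (fun c => (c.toNat : Int))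
-- hash of the window of length K starting at i
def pvW (L : List Int) (K i : Nat) : Int := ((L.drop i).take K).foldl pvF 0

theorem pvMod_eq (a : Int) : PySem.Int.mod a 1000000007 = a % pvP := by
  rw [PySem.Int.mod_eq_emod_of_pos (by decide : (0:Int) < 1000000007)]; rfl

theorem foldl_g_shift (l : List Int) : ∀ a : Int,
    l.foldl pvG a = a * 256 ^ l.length + l.foldl pvG 0 := by
  induction l with
  | nil => intro a; simp
  | cons c t ih =>
      intro a
      simp only [List.foldl_cons, List.length_cons]
      rw [ih (pvG a c), ih (pvG 0 c)]
      simp only [pvG]; ring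

theorem foldl_f_g (l : List Int) : ∀ a : Int,
    l.foldl pvF (a % pvP) = (l.foldl pvG a) % pvP := by
  induction l with
  | nil => intro a; simp
  | cons c t ih =>
      intro a
      simp only [List.foldl_cons]
      have h : pvF (a % pvP) c = (pvG a c) % pvP := by
        simp only [pvF, pvG]
        exact Int.ModEq.add_right c
          (Int.ModEq.mul_right 256
            (show Int.ModEq pvP (a % pvP) a from Int.emod_emod_of_dvd a dvd_rfl))
      rw [h, ih (pvG a c)]

theorem pvH_eq (l : List Int) : l.foldl pvF 0 = (l.foldl pvG 0) % pvP := by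
  have := foldl_f_g l 0
  simpa using this

theorem pvOrd_nat (s : String) (j : Nat) (hj : j < s.toList.length) :
    pvOrd s (j : Int) = (pvOrdL s).getD j 0 := by
  simp [pvOrd, pvOrdL, List.getD_eq_getElem?_getD, List.getElem?_map,
    List.getElem?_eq_getElem hj]

theorem pvOrdL_len (s : String) : (pvOrdL s).length = s.toList.length := by
  simp [pvOrdL]

-- the first-window index fold equals the fold over the window itself
theorem idxFold (s : String) : ∀ (m j : Nat) (a : Int), j + m ≤ s.toList.length →
    (PySem.List.pyRange (j : Int) ((j : Int) + (m : Int)) 1).foldl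
        (fun h i => (h * 256 + pvOrd s i) % pvP) a
      = (((pvOrdL s).drop j).take m).foldl pvF a := by
  intro m
  induction m with
  | zero =>
      intro j a _
      rw [show ((j : Int) + ((0:Nat) : Int)) = (j : Int) by push_cast; ring,
        PySem.List.pyRange_one_eq_nil le_rfl]
      simp
  | succ m ih =>
      intro j a hjm
      have hj : j < s.toList.length := by omega
      rw [PySem.List.pyRange_one_cons (by push_cast; omega)]
      simp only [List.foldl_cons]
      have harg : ((j : Int) + 1 : Int) = ((j + 1 : Nat) : Int) := by push_cast; ring
      have harg2 : ((j : Int) + ((m + 1 : Nat) : Int) : Int) = (((j + 1 : Nat) : Int) + (m : Nat)) := by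
        push_cast; ring
      rw [harg, harg2, ih (j + 1) ((a * 256 + pvOrd s j) % pvP) (by omega)]
      have hdrop : (pvOrdL s).drop j = (pvOrdL s).getD j 0 :: (pvOrdL s).drop (j + 1) := by
        rw [List.drop_eq_getElem_cons (by rw [pvOrdL_len]; exact hj)]
        rw [List.getD_eq_getElem?_getD, List.getElem?_eq_getElem (by rw [pvOrdL_len]; exact hj)]
        rfl
      rw [hdrop, pvOrd_nat s j hj]
      simp [pvF]

-- rolling step: from the hash of window i to the hash of window i+1
theorem roll (L : List Int) (K i : Nat) (hK : 1 ≤ K) (hi : i + K < L.length) :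
    ((pvW L K i - L.getD i 0 * (((256:Int) ^ (K - 1)) % pvP)) % pvP * 256 + L.getD (i + K) 0) % pvP
      = pvW L K (i + 1) := by
  obtain ⟨K', rfl⟩ : ∃ K', K = K' + 1 := ⟨K - 1, by omega⟩
  set c := L.getD i 0 with hc
  set d := L.getD (i + (K' + 1)) 0 with hd
  set t : List Int := (L.drop (i + 1)).take K' with ht
  have htlen : t.length = K' := by
    rw [ht, List.length_take, List.length_drop]; omega
  have hwin1 : (L.drop i).take (K' + 1) = c :: t := by
    rw [List.drop_eq_getElem_cons (by omega), List.take_succ_cons, hc, ht,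
      List.getD_eq_getElem?_getD, List.getElem?_eq_getElem (by omega)]
    rfl
  have hwin2 : (L.drop (i + 1)).take (K' + 1) = t ++ [d] := by
    rw [List.take_add_one, ht, hd]
    congr 1
    rw [List.getElem?_drop, List.getElem?_eq_getElem (by omega),
      List.getD_eq_getElem?_getD, List.getElem?_eq_getElem (by omega)]
    simp
    congr 1
    omega
  have hU1 : ((L.drop i).take (K' + 1)).foldl pvG 0 = c * 256 ^ K' + t.foldl pvG 0 := by
    rw [hwin1, List.foldl_cons]
    have : pvG 0 c = c := by simp [pvG]
    rw [this, foldl_g_shift, htlen]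
  have hU2 : ((L.drop (i + 1)).take (K' + 1)).foldl pvG 0 = t.foldl pvG 0 * 256 + d := by
    rw [hwin2, List.foldl_append]
    rfl
  have hsub : ((L.drop i).take (K' + 1)).foldl pvG 0 - c * 256 ^ K' = t.foldl pvG 0 := by
    rw [hU1]; ring
  show _ = pvW L (K' + 1) (i + 1)
  rw [pvW, pvW, pvH_eq, pvH_eq, hU2]
  have hKs : K' + 1 - 1 = K' := by omega
  rw [hKs]
  set X := ((L.drop i).take (K' + 1)).foldl pvG 0 with hX
  have h1 : Int.ModEq pvP ((X % pvP - c * (((256:Int) ^ K') % pvP)) % pvP) (t.foldl pvG 0) := by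
    have ha : Int.ModEq pvP (X % pvP) X := Int.emod_emod_of_dvd X dvd_rfl
    have hb : Int.ModEq pvP (((256:Int) ^ K') % pvP) ((256:Int) ^ K') :=
      Int.emod_emod_of_dvd _ dvd_rfl
    have h2 : Int.ModEq pvP (X % pvP - c * (((256:Int) ^ K') % pvP)) (X - c * 256 ^ K') :=
      ha.sub (hb.mul_left c)
    have h3 := (Int.emod_emod_of_dvd (X % pvP - c * (((256:Int) ^ K') % pvP)) (dvd_refl pvP)).trans h2
    rw [hsub] at h3
    exact h3
  exact (h1.mul_right 256).add_right d

-- B's inner fold over a window slice is the window hash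
theorem sliceHash (s : String) (K i : Nat) :
    (PySem.List.slice s.toList (some (i : Int)) (some ((i : Int) + ((K : Nat) : Int)))).foldl
        (fun h c => (h * 256 + (c.toNat : Int)) % pvP) 0
      = pvW (pvOrdL s) K i := by
  rw [PySem.List.slice_natCast_add, pvW, pvOrdL, ← List.map_drop, ← List.map_take,
    List.foldl_map]
  rfl

theorem zeroStep (a x : Int) (hx : (x * 256) % pvP = 1 % pvP) :
    ((0 - a * x) % pvP * 256 + a) % pvP = 0 := by
  have h1 : Int.ModEq pvP ((0 - a * x) % pvP) (0 - a * x) := Int.emod_emod_of_dvd _ dvd_rfl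
  have h2 : Int.ModEq pvP ((0 - a * x) % pvP * 256 + a) ((0 - a * x) * 256 + a) :=
    (h1.mul_right 256).add_right a
  have h3 : Int.ModEq pvP (a * (x * 256)) (a * 1) := Int.ModEq.mul_left a hx
  have h4 : Int.ModEq pvP ((0 - a * x) * 256 + a) 0 := by
    have he : (0 - a * x) * 256 + a = -(a * (x * 256)) + a := by ring
    rw [he]
    have := (h3.neg).add_right a
    simpa using this
  have h6 : ((0 - a * x) % pvP * 256 + a) % pvP = 0 % pvP := h2.trans h4
  rw [Int.zero_emod] at h6
  exact h6

-- the rolling loop, unrolled: it adds the window hashes W j, W (j+1), … in order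
theorem rollLoop (s : String) (K : Nat) (bk : Int)
    (hbk : bk = ((256:Int) ^ (K - 1)) % pvP) (hK : 1 ≤ K) :
    ∀ (m j : Nat) (hs : List Int), 1 ≤ j → j + m + K ≤ s.toList.length + 1 →
    (PySem.List.pyRange (j : Int) ((j : Int) + (m : Int)) 1).foldl
        (fun st i =>
          (PySem.Set.add st.1
            (((st.2 - pvOrd s (i - 1) * bk) % pvP * 256 + pvOrd s (i + (K : Int) - 1)) % pvP),
            ((st.2 - pvOrd s (i - 1) * bk) % pvP * 256 + pvOrd s (i + (K : Int) - 1)) % pvP))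
        (hs, pvW (pvOrdL s) K (j - 1))
      = ((List.range m).foldl (fun hs r => PySem.Set.add hs (pvW (pvOrdL s) K (j + r))) hs,
          pvW (pvOrdL s) K (j - 1 + m)) := by
  subst hbk
  intro m
  induction m with
  | zero =>
      intro j hs _ _
      rw [show ((j : Int) + ((0:Nat) : Int)) = (j : Int) by push_cast; ring,
        PySem.List.pyRange_one_eq_nil le_rfl]
      simp
  | succ m ih =>
      intro j hs hj hjm
      have hlen : (pvOrdL s).length = s.toList.length := by simp [pvOrdL]
      rw [PySem.List.pyRange_one_cons (by push_cast; omega)]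
      simp only [List.foldl_cons]
      have e1 : ((j : Int) - 1) = (((j - 1 : Nat) : Nat) : Int) := by omega
      have e2 : ((j : Int) + (K : Int) - 1) = (((j - 1 + K : Nat) : Nat) : Int) := by push_cast; omega
      have hv1 : pvOrd s ((j : Int) - 1) = (pvOrdL s).getD (j - 1) 0 := by
        rw [e1, pvOrd_nat s (j - 1) (by omega)]
      have hv2 : pvOrd s ((j : Int) + (K : Int) - 1) = (pvOrdL s).getD (j - 1 + K) 0 := by
        rw [e2, pvOrd_nat s (j - 1 + K) (by omega)]
      rw [hv1, hv2]
      rw [roll (pvOrdL s) K (j - 1) hK (by omega)]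
      have e3 : ((j : Int) + 1) = (((j + 1 : Nat) : Nat) : Int) := by push_cast; ring
      have e4 : ((j : Int) + ((m + 1 : Nat) : Int)) = ((((j + 1 : Nat)) : Int) + ((m : Nat) : Int)) := by
        push_cast; ring
      rw [show j - 1 + 1 = j from by omega]
      have := ih (j + 1) (PySem.Set.add hs (pvW (pvOrdL s) K j)) (by omega) (by omega)
      rw [show j + 1 - 1 = j from by omega] at this
      rw [e3, e4, this]
      simp only [Prod.mk.injEq]
      refine ⟨?_, ?_⟩
      · rw [List.range_succ_eq_map, List.foldl_cons, List.foldl_map]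
        rw [show j + 0 = j from by omega]
        simp only [show ∀ r, j + 1 + r = j + Nat.succ r from fun r => by omega]
      · congr 1
        omega

-- the k = 0 rolling loop leaves the state ({0}, 0) unchanged
theorem zeroLoop (s : String) (x : Int) (hx : (x * 256) % pvP = 1 % pvP) :
    ∀ (m j : Nat),
    (PySem.List.pyRange (j : Int) ((j : Int) + (m : Int)) 1).foldl
        (fun (st : List Int × Int) i =>
          (PySem.Set.add st.1 (((st.2 - pvOrd s (i - 1) * x) % pvP * 256 + pvOrd s (i - 1)) % pvP),
            ((st.2 - pvOrd s (i - 1) * x) % pvP * 256 + pvOrd s (i - 1)) % pvP))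
        ([0], 0)
      = ([0], 0) := by
  intro m
  induction m with
  | zero =>
      intro j
      rw [show ((j : Int) + ((0:Nat) : Int)) = (j : Int) by push_cast; ring,
        PySem.List.pyRange_one_eq_nil le_rfl]
      rfl
  | succ m ih =>
      intro j
      rw [PySem.List.pyRange_one_cons (by push_cast; omega)]
      simp only [List.foldl_cons]
      rw [zeroStep (pvOrd s ((j:Int) - 1)) x hx]
      rw [PySem.Set.add_of_mem (by simp)]
      have e3 : ((j : Int) + 1) = (((j + 1 : Nat) : Nat) : Int) := by push_cast; ring
      have e4 : ((j : Int) + ((m + 1 : Nat) : Int)) = ((((j + 1 : Nat)) : Int) + ((m : Nat) : Int)) := by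
        push_cast; ring
      rw [e3, e4, ih (j + 1)]

-- adding 0 to the set {0} repeatedly changes nothing
theorem constFold : ∀ (l : List Nat),
    l.foldl (fun (hs : List Int) _ => PySem.Set.add hs 0) [0] = [0] := by
  intro l
  induction l with
  | nil => rfl
  | cons a t ih => rw [List.foldl_cons, PySem.Set.add_of_mem (by simp), ih]

-- a slice from i to i is empty
theorem sliceNil {α : Type} (l : List α) (i : Nat) :
    PySem.List.slice l (some (i : Int)) (some (i : Int)) = [] := by
  rw [PySem.List.slice_natCast]
  simp

-- ===== VERDICT (by name: the statement is the Claim_ definition above) =====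
theorem get_hashes_spec : Claim_equal_get_hashes := by
  intro s k _ hk
  show get_hashes s k = get_hashes_alt s k
  have hk' : (0:Int) ≤ k := hk
  obtain ⟨K, rfl⟩ : ∃ K : Nat, k = (K : Int) := ⟨k.toNat, by omega⟩
  simp only [get_hashes, get_hashes_alt, PySem.Str.len_eq, pvMod_eq]
  by_cases hK0 : K = 0
  · subst hK0
    simp only [Nat.cast_zero, sub_zero, add_zero]
    rw [if_neg (by omega)]
    rw [PySem.List.pyRange_one_eq_nil le_rfl, List.foldl_nil]
    rw [PySem.Set.add_of_not_mem (by simp), List.nil_append]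
    have hx : ((pvPowMod 256 (0 - 1) 1000000007) * 256) % pvP = 1 % pvP := by decide
    have hz := zeroLoop s (pvPowMod 256 (0 - 1) 1000000007) hx s.toList.length 1
    simp only [Nat.cast_one] at hz
    rw [show ((1:Int) + (s.toList.length : Int)) = (s.toList.length : Int) + 1 from by ring] at hz
    rw [hz]
    conv_rhs =>
      rw [show ((s.toList.length : Int) + 1) = ((s.toList.length + 1 : Nat) : Int) from by push_cast; ring,
        PySem.List.pyRange_zero_nat, List.foldl_map]
      simp only [sliceNil, List.foldl_nil]
      rw [List.range_succ_eq_map, List.foldl_cons, List.foldl_map]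
    rw [PySem.Set.add_of_not_mem (by simp), List.nil_append]
    rw [constFold]
  · have hK1 : 1 ≤ K := by omega
    by_cases hNK : s.toList.length < K
    · rw [if_pos (by exact_mod_cast hNK)]
      rw [PySem.List.pyRange_one_eq_nil (by omega), List.foldl_nil]
    · rw [if_neg (by omega)]
      have h0 := idxFold s K 0 0 (by omega)
      simp only [Nat.cast_zero, zero_add, List.drop_zero] at h0
      have hW0 : (((pvOrdL s)).take K).foldl pvF 0 = pvW (pvOrdL s) K 0 := by
        rw [pvW, List.drop_zero]
      rw [hW0] at h0
      rw [h0]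
      have hbk : pvPowMod 256 ((K:Int) - 1) 1000000007 = ((256:Int) ^ (K - 1)) % pvP := by
        rw [pvPowMod, if_pos (by omega), PySem.Int.powMod, pvMod_eq]
        congr 2
        omega
      rw [hbk]
      conv_rhs =>
        rw [show ((s.toList.length : Int) - (K:Int) + 1) = ((s.toList.length - K + 1 : Nat) : Int) from by omega,
          PySem.List.pyRange_zero_nat, List.foldl_map]
        simp only [sliceHash]
        rw [List.range_succ_eq_map, List.foldl_cons, List.foldl_map]
      have hrl := rollLoop s K _ rfl hK1 (s.toList.length - K) 1
        (PySem.Set.add [] (pvW (pvOrdL s) K 0)) le_rfl (by omega)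
      simp only [Nat.cast_one, Nat.sub_self] at hrl
      rw [show ((s.toList.length:Int) - (K:Int) + 1) = 1 + ((s.toList.length - K : Nat) : Int) from by omega]
      rw [hrl]
      simp only [Nat.succ_eq_add_one, show ∀ r : Nat, 1 + r = r + 1 from fun r => by omega]
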